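-- pv_equiv track=rewrite | github.com/joshanashakya/dissertation | workspace/dataset/java-python/GeeksForGeeks/4595/A/2.py | longestFibonacciSubarray
-- ===== SOURCE A (Python) =====
-- def longestFibonacciSubarray(n, a):
--
--     # Any 2 terms are Fibonacci-like
--     if (n <= 2):
--         return n
--
--     Len = 2
--
--     mx = -10**9
--
--     for i in range(2, n):
--
--         # If previous subarray can be extended
--         if (a[i] == a[i - 1] + a[i - 2]):
--             Len += 1
--
--         # Any 2 terms are Fibonacci-like
--         else:
--             Len = 2
--
--         # Find the maximum Length
--         mx = max(mx, Len)
--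
--     return mx
-- ===== SOURCE B (Python) =====
-- def longestFibonacciSubarray(n, a):
--     # Two-phase: build the table c[k] = (a[k+2] extends a Fibonacci-like run),
--     # then measure the longest run of consecutive True entries block by block.
--     if n <= 2:
--         return n
--     c = [a[i] == a[i - 1] + a[i - 2] for i in range(2, n)]
--     best = 0
--     i = 0
--     m = len(c)
--     while i < m:
--         if not c[i]:
--             i += 1
--             continue
--         j = i + 1
--         while j < m and c[j]:
--             j += 1
--         if j - i > best:
--             best = j - i
--         i = j
--     return 2 + best
-- ===== Notes on version B (the rewrite author's own statement) =====
-- stated objective: alternative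
-- what changed: Replaces A's fused running-length/maximum accumulator (Len, mx) with a two-phase computation: first build the boolean table c[k] = (a[k+2] == a[k+1] + a[k]), then scan it block by block, jumping over each maximal True-run and keeping the longest, returning 2 + that run (A's -10**9 sentinel disappears).
import Mathlib
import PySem

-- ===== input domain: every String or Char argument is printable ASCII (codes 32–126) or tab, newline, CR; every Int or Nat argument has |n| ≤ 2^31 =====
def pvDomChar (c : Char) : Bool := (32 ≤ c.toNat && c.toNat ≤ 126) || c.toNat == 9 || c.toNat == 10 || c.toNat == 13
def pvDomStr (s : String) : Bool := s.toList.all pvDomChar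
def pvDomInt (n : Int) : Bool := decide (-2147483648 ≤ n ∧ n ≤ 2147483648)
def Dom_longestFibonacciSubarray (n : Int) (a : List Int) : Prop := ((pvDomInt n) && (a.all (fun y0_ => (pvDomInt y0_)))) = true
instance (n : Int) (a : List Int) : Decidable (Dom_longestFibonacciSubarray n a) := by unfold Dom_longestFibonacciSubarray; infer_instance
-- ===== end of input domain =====

-- B replaces A's fused running-length/maximum accumulator with a two-phase
-- build-the-boolean-table-then-scan-its-True-blocks computation (alternative decomposition, same cost).

-- ===== PORT A =====
def longestFibonacciSubarray (n : Int) (a : List Int) : Int :=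
  if n ≤ 2 then n
  else
    let st :=
      (PySem.List.pyRange 2 n 1).foldl
        (fun (st : Int × Int) (i : Int) =>
          let Len :=
            if PySem.List.pyGetD a i 0 = PySem.List.pyGetD a (i - 1) 0 + PySem.List.pyGetD a (i - 2) 0
            then st.1 + 1 else 2
          (Len, max st.2 Len))
        (2, -10 ^ 9)
    st.2

-- ===== PORT B =====
-- port of Source B's block scan: skip a False, or jump over a whole maximal True-block
def pvLongestTrueRun : List Bool → Int
  | [] => 0
  | false :: t => pvLongestTrueRun t
  | true :: t =>
      max (1 + ((t.takeWhile id).length : Int)) (pvLongestTrueRun (t.dropWhile id))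
termination_by c => c.length
decreasing_by
· simp
· simpa using Nat.lt_succ_of_le (List.length_dropWhile_le id t)

def longestFibonacciSubarray_alt (n : Int) (a : List Int) : Int :=
  if n ≤ 2 then n
  else
    let c :=
      (PySem.List.pyRange 2 n 1).map
        (fun (i : Int) =>
          decide (PySem.List.pyGetD a i 0 = PySem.List.pyGetD a (i - 1) 0 + PySem.List.pyGetD a (i - 2) 0))
    2 + pvLongestTrueRun c

-- ===== PRECONDITION & SPEC =====
-- A raises IndexError when 2 < n and n exceeds len(a); Pre_ excludes exactly those inputs.
def Pre_longestFibonacciSubarray (n : Int) (a : List Int) : Prop :=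
  n ≤ 2 ∨ n ≤ (a.length : Int)
instance (n : Int) (a : List Int) : Decidable (Pre_longestFibonacciSubarray n a) := by
  unfold Pre_longestFibonacciSubarray; infer_instance
def pvWitness_longestFibonacciSubarray : Int × List Int := (5, [1, 1, 2, 3, 5])

def Spec_longestFibonacciSubarray (n : Int) (a : List Int) (out : Int) : Prop := out = longestFibonacciSubarray_alt n a
instance (n : Int) (a : List Int) (out : Int) : Decidable (Spec_longestFibonacciSubarray n a out) := by unfold Spec_longestFibonacciSubarray; infer_instance

-- ===== CLAIM (what is proved, stated in full; the proofs are below) =====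
def Claim_equal_longestFibonacciSubarray : Prop := ∀ (n : Int) (a : List Int), Dom_longestFibonacciSubarray n a → Pre_longestFibonacciSubarray n a → Spec_longestFibonacciSubarray n a (longestFibonacciSubarray n a)

-- ===== LEMMAS AND PROOFS =====

-- A's fold step, over the boolean table
def pvStep (st : Int × Int) (b : Bool) : Int × Int :=
  let L := if b then st.1 + 1 else 2
  (L, max st.2 L)

-- max of run-lengths ending at each position, seeded with current run r
def pvF : List Bool → Int → Int
  | [], r => r
  | false :: t, _ => max 0 (pvF t 0)
  | true :: t, r => max (r + 1) (pvF t (r + 1))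

theorem pvFold_eq : ∀ (c : List Bool) (r mx : Int),
    (c.foldl pvStep (2 + r, mx)).2 = if c.isEmpty then mx else max mx (2 + pvF c r) := by
  intro c
  induction c with
  | nil => intro r mx; simp
  | cons b t ih =>
      intro r mx
      cases b with
      | false =>
          have hstep : pvStep (2 + r, mx) false = (2 + 0, max mx (2 + 0)) := by
            simp [pvStep]
          rw [List.foldl_cons, hstep, ih 0 (max mx (2 + 0))]
          cases t with
          | nil => simp [pvF]
          | cons b2 t2 =>
              simp only [List.isEmpty_cons, pvF, Bool.false_eq_true, if_false]
              omega
      | true =>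
          have hstep : pvStep (2 + r, mx) true = (2 + (r + 1), max mx (2 + (r + 1))) := by
            simp [pvStep, Prod.ext_iff]
            omega
          rw [List.foldl_cons, hstep, ih (r + 1) (max mx (2 + (r + 1)))]
          cases t with
          | nil => simp [pvF]
          | cons b2 t2 =>
              simp only [List.isEmpty_cons, pvF, Bool.false_eq_true, if_false]
              omega

theorem pvLtr_nonneg_aux : ∀ (N : Nat) (c : List Bool), c.length ≤ N → 0 ≤ pvLongestTrueRun c := by
  intro N
  induction N with
  | zero =>
      intro c h
      have : c = [] := List.eq_nil_of_length_eq_zero (Nat.le_zero.mp h)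
      subst this
      simp [pvLongestTrueRun]
  | succ N ih =>
      intro c h
      match c with
      | [] => simp [pvLongestTrueRun]
      | false :: t =>
          simp only [pvLongestTrueRun]
          exact ih t (by simpa using Nat.le_of_succ_le_succ (by simpa using h))
      | true :: t =>
          simp only [pvLongestTrueRun]
          exact le_max_of_le_left (by positivity)

theorem pvLtr_nonneg (c : List Bool) : 0 ≤ pvLongestTrueRun c :=
  pvLtr_nonneg_aux c.length c le_rfl

-- closed description of pvF in terms of the head block
def pvAux : List Bool → Int → Int
  | [], r => r
  | false :: t, _ => pvLongestTrueRun t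
  | true :: t, r => max (r + 1 + ((t.takeWhile id).length : Int)) (pvLongestTrueRun (t.dropWhile id))

theorem pvAux_zero (c : List Bool) : pvAux c 0 = pvLongestTrueRun c := by
  match c with
  | [] => simp [pvAux, pvLongestTrueRun]
  | false :: t => simp [pvAux, pvLongestTrueRun]
  | true :: t => simp [pvAux, pvLongestTrueRun]

theorem pvF_eq_aux : ∀ (c : List Bool) (r : Int), 0 ≤ r → pvF c r = pvAux c r := by
  intro c
  induction c with
  | nil => intro r _; rfl
  | cons b t ih =>
      intro r hr
      cases b with
      | false =>
          have h0 := ih 0 le_rfl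
          have hz := pvAux_zero t
          have hnn := pvLtr_nonneg t
          show max 0 (pvF t 0) = pvAux (false :: t) r
          rw [h0, hz]
          show max 0 (pvLongestTrueRun t) = pvLongestTrueRun t
          omega
      | true =>
          have h1 := ih (r + 1) (by omega)
          show max (r + 1) (pvF t (r + 1)) = pvAux (true :: t) r
          rw [h1]
          cases t with
          | nil =>
              show max (r + 1) (r + 1) = max (r + 1 + (((List.takeWhile id ([] : List Bool)).length : Nat) : Int)) (pvLongestTrueRun (List.dropWhile id ([] : List Bool)))
              simp [pvLongestTrueRun]
              omega
          | cons b2 t2 =>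
              cases b2 with
              | false =>
                  show max (r + 1) (pvAux (false :: t2) (r + 1)) = pvAux (true :: false :: t2) r
                  simp only [pvAux, List.takeWhile_cons, List.dropWhile_cons, id_eq,
                    Bool.false_eq_true, if_false, List.length_nil, pvLongestTrueRun]
                  have hnn := pvLtr_nonneg t2
                  push_cast
                  omega
              | true =>
                  show max (r + 1) (pvAux (true :: t2) (r + 1)) = pvAux (true :: true :: t2) r
                  simp only [pvAux, List.takeWhile_cons, List.dropWhile_cons, id_eq,
                    if_true, List.length_cons]
                  have : (0 : Int) ≤ ((t2.takeWhile id).length : Int) := by positivity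
                  push_cast
                  omega

-- ===== VERDICT (by name: the statement is the Claim_ definition above) =====
theorem longestFibonacciSubarray_spec : Claim_equal_longestFibonacciSubarray := by
  intro n a _ _
  unfold Spec_longestFibonacciSubarray longestFibonacciSubarray longestFibonacciSubarray_alt
  by_cases h : n ≤ 2
  · simp [h]
  · simp only [if_neg h]
    show ((PySem.List.pyRange 2 n 1).foldl
        (fun (st : Int × Int) (i : Int) =>
          let Len :=
            if PySem.List.pyGetD a i 0 = PySem.List.pyGetD a (i - 1) 0 + PySem.List.pyGetD a (i - 2) 0
            then st.1 + 1 else 2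
          (Len, max st.2 Len))
        (2, -10 ^ 9)).2
      = 2 + pvLongestTrueRun ((PySem.List.pyRange 2 n 1).map
          (fun (i : Int) =>
            decide (PySem.List.pyGetD a i 0 = PySem.List.pyGetD a (i - 1) 0 + PySem.List.pyGetD a (i - 2) 0)))
    set g : Int → Bool := fun i =>
      decide (PySem.List.pyGetD a i 0 = PySem.List.pyGetD a (i - 1) 0 + PySem.List.pyGetD a (i - 2) 0) with hg
    have hfold : ((PySem.List.pyRange 2 n 1).foldl
        (fun (st : Int × Int) (i : Int) =>
          let Len :=
            if PySem.List.pyGetD a i 0 = PySem.List.pyGetD a (i - 1) 0 + PySem.List.pyGetD a (i - 2) 0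
            then st.1 + 1 else 2
          (Len, max st.2 Len))
        (2, -10 ^ 9))
        = ((PySem.List.pyRange 2 n 1).map g).foldl pvStep (2, -10 ^ 9) := by
      rw [List.foldl_map]
      congr 1
      funext st i
      simp [pvStep, hg]
    rw [hfold]
    set c := (PySem.List.pyRange 2 n 1).map g with hc
    have hcons : PySem.List.pyRange 2 n 1 = 2 :: PySem.List.pyRange 3 n 1 :=
      PySem.List.pyRange_one_cons (by omega)
    have hne : c.isEmpty = false := by rw [hc, hcons]; simp
    have h2 : (c.foldl pvStep (2 + 0, -10 ^ 9)).2
        = if c.isEmpty then (-10 ^ 9 : Int) else max (-10 ^ 9) (2 + pvF c 0) := pvFold_eq c 0 _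
    have hF : pvF c 0 = pvLongestTrueRun c := by rw [pvF_eq_aux c 0 le_rfl, pvAux_zero]
    have hnn : 0 ≤ pvLongestTrueRun c := pvLtr_nonneg c
    rw [show ((2 : Int), (-10 ^ 9 : Int)) = ((2 : Int) + 0, (-10 ^ 9 : Int)) by norm_num] at *
    rw [h2, hne, hF]
    simp only [Bool.false_eq_true, if_false]
    omega
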